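-- pv_equiv track=rewrite | github.com/realmistic/aoc_2024 | src/solutions/day15_3.py | move_object
-- ===== SOURCE A (Python) =====
-- EMPTY = '.'
--
-- WALL = '#'
--
-- def move_object(start_pos, dir, grid):
--     x, y = start_pos[0], start_pos[1]
--     targetx, targety = x + dir[0], y + dir[1]
--     obj = grid[x][y]
--
--     if grid[targetx][targety] == WALL:
--         return False
--     elif grid[targetx][targety] == EMPTY:
--         pass
--     elif not move_object((targetx, targety), dir, grid):
--         return False
--
--     grid[targetx][targety] = obj
--     grid[x][y] = EMPTY
--     return True
-- ===== SOURCE B (Python) =====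
-- # Iterative two-phase version: walk the chain once collecting (position, object),
-- # then write far-end-first; performs the same in-place grid mutation as A.
-- EMPTY = '.'
-- WALL = '#'
--
-- def move_object(start_pos, dir, grid):
--     dx, dy = dir[0], dir[1]
--     sx, sy = start_pos[0], start_pos[1]
--     chain = [(sx, sy, grid[sx][sy])]
--     while True:
--         tx, ty = chain[-1][0] + dx, chain[-1][1] + dy
--         cell = grid[tx][ty]
--         if cell == WALL:
--             return False
--         if cell == EMPTY:
--             break
--         chain.append((tx, ty, cell))
--     for px, py, obj in reversed(chain):
--         grid[px + dx][py + dy] = obj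
--     grid[sx][sy] = EMPTY
--     return True
-- ===== Notes on version B (the rewrite author's own statement) =====
-- stated objective: alternative
-- what changed: Replaces A's recursive push (recurse on the next cell, write on unwind) by an iterative two-phase walk: collect the chain of (position, object) pairs in one loop, then on success copy them far-end-first and clear the start cell.
import Mathlib
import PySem

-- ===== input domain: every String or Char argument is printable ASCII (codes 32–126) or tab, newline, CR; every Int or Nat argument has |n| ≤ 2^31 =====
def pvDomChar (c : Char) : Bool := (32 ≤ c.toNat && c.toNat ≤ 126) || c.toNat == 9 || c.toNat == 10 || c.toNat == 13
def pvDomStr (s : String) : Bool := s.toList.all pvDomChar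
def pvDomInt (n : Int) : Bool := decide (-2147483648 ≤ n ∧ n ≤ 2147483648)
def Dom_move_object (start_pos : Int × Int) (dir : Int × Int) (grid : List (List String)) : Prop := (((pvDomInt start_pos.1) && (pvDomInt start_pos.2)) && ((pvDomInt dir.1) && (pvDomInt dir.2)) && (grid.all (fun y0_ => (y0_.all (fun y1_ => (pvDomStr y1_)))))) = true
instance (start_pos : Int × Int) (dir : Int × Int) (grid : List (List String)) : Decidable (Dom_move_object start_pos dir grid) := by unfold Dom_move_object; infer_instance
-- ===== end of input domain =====

-- B replaces A's mutating recursion by an iterative two-phase walk (collect the chain,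
-- then write far-end-first); same return value and same in-place mutation, objective: alternative.
-- The equivalence proved below is about the RETURN value (the Python functions also mutate
-- `grid` identically on every input admitted by Pre_).

-- shared index helpers (Python's negative-wrap read/write, totalised with a default;
-- Pre_move_object keeps every actually-performed access in range)
def pvCell (grid : List (List String)) (i j : Int) : String :=
  PySem.List.pyGetD (PySem.List.pyGetD grid i []) j ""

def pvPut (grid : List (List String)) (i j : Int) (v : String) : List (List String) :=
  PySem.List.pySetD grid i (PySem.List.pySetD (PySem.List.pyGetD grid i []) j v)

-- fuel: a totality guard only; under Pre_move_object the walk stops strictly earlier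
def pvFuel (grid : List (List String)) : Nat :=
  2 * (grid.length + (grid.map List.length).foldl Nat.max 0) + 2

-- ===== PORT A =====
-- A's recursion, threading the mutated grid through (the Python mutates `grid` in place)
def movA : Nat → (Int × Int) → (Int × Int) → List (List String) → Bool × List (List String)
  | 0, _, _, grid => (false, grid)
  | fuel+1, pos, dir, grid =>
    let x := pos.1
    let y := pos.2
    let tx := x + dir.1
    let ty := y + dir.2
    let obj := pvCell grid x y
    if pvCell grid tx ty == "#" then (false, grid)
    else if pvCell grid tx ty == "." then
      (true, pvPut (pvPut grid tx ty obj) x y ".")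
    else
      let r := movA fuel (tx, ty) dir grid
      if !r.1 then (false, r.2)
      else (true, pvPut (pvPut r.2 tx ty obj) x y ".")

def move_object (start_pos : Int × Int) (dir : Int × Int) (grid : List (List String)) : Bool :=
  (movA (pvFuel grid) start_pos dir grid).1

-- ===== PORT B =====
-- Source B's phase 2: one write `grid[px+dx][py+dy] = obj` per chain entry; the chain is
-- consed front-first, so folding over it is exactly Python's `for … in reversed(chain)`
def pvWrite (dir : Int × Int) (grid : List (List String)) (e : Int × Int × String) : List (List String) :=
  pvPut grid (e.1 + dir.1) (e.2.1 + dir.2) e.2.2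

-- Source B's `while True` walk: chain of (position, object) entries, newest at the head
def movB : Nat → List (Int × Int × String) → (Int × Int) → List (List String) → Bool × List (List String)
  | 0, _, _, grid => (false, grid)
  | fuel+1, chain, dir, grid =>
    let last := chain.headD (0, 0, "")
    let tx := last.1 + dir.1
    let ty := last.2.1 + dir.2
    let cell := pvCell grid tx ty
    if cell == "#" then (false, grid)
    else if cell == "." then (true, chain.foldl (pvWrite dir) grid)
    else movB fuel ((tx, ty, cell) :: chain) dir grid

def move_object_alt (start_pos : Int × Int) (dir : Int × Int) (grid : List (List String)) : Bool :=
  match movB (pvFuel grid) [(start_pos.1, start_pos.2, pvCell grid start_pos.1 start_pos.2)] dir grid with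
  | (false, _) => false
  | (true, _) => true  -- (Python then performs the final write grid[sx][sy]='.'; the Bool result is true)

-- ===== PRECONDITION & SPEC =====
def pvCell? (grid : List (List String)) (i j : Int) : Option String :=
  (PySem.List.pyGet? grid i).bind (fun r => PySem.List.pyGet? r j)

def pvPos (s d : Int × Int) (j : Nat) : Int × Int := (s.1 + j * d.1, s.2 + j * d.2)

-- Pre_ = exactly the inputs on which the Python A returns (no exception): the start cell is a
-- valid index, and walking along dir the cells stay in (negative-wrap) range up to the first
-- wall or empty cell; otherwise A raises IndexError or RecursionError.
def Pre_move_object (start_pos : Int × Int) (dir : Int × Int) (grid : List (List String)) : Prop :=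
  (pvCell? grid start_pos.1 start_pos.2).isSome = true ∧
  ∃ k ∈ Finset.Icc 1 (pvFuel grid),
    (∀ j ∈ Finset.Icc 1 k,
      (pvCell? grid (pvPos start_pos dir j).1 (pvPos start_pos dir j).2).isSome = true) ∧
    (∀ j ∈ Finset.Icc 1 (k-1),
      pvCell? grid (pvPos start_pos dir j).1 (pvPos start_pos dir j).2 ≠ some "#" ∧
      pvCell? grid (pvPos start_pos dir j).1 (pvPos start_pos dir j).2 ≠ some ".") ∧
    (pvCell? grid (pvPos start_pos dir k).1 (pvPos start_pos dir k).2 = some "#" ∨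
     pvCell? grid (pvPos start_pos dir k).1 (pvPos start_pos dir k).2 = some ".")

instance (start_pos : Int × Int) (dir : Int × Int) (grid : List (List String)) : Decidable (Pre_move_object start_pos dir grid) := by
  unfold Pre_move_object; infer_instance

def pvWitness_move_object : (Int × Int) × (Int × Int) × List (List String) :=
  ((1, 1), (0, 1), [["#", "#", "#", "#"], ["#", "O", ".", "#"], ["#", "#", "#", "#"]])

def Spec_move_object (start_pos : Int × Int) (dir : Int × Int) (grid : List (List String)) (out : Bool) : Prop := out = move_object_alt start_pos dir grid
instance (start_pos : Int × Int) (dir : Int × Int) (grid : List (List String)) (out : Bool) : Decidable (Spec_move_object start_pos dir grid out) := by unfold Spec_move_object; infer_instance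

-- ===== CLAIM (what is proved, stated in full; the proofs are below) =====
def Claim_equal_move_object : Prop := ∀ (start_pos : Int × Int) (dir : Int × Int) (grid : List (List String)), Dom_move_object start_pos dir grid → Pre_move_object start_pos dir grid → Spec_move_object start_pos dir grid (move_object start_pos dir grid)

-- ===== LEMMAS AND PROOFS =====
lemma movB_fst (fuel : Nat) :
    ∀ (x y : Int) (o : String) (rest : List (Int × Int × String)) (d : Int × Int)
      (g : List (List String)),
      (movB fuel ((x, y, o) :: rest) d g).1 = (movA fuel (x, y) d g).1 := by
  induction fuel with
  | zero => intro x y o rest d g; simp [movA, movB]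
  | succ n ih =>
    intro x y o rest d g
    simp only [movA, movB, List.headD_cons]
    by_cases h1 : pvCell g (x + d.1) (y + d.2) == "#"
    · simp [h1]
    · by_cases h2 : pvCell g (x + d.1) (y + d.2) == "."
      · simp [h1, h2]
      · simp only [h1, h2, Bool.false_eq_true, if_false]
        rw [ih]
        rcases hr : movA n (x + d.1, y + d.2) d g with ⟨b, g'⟩
        cases b <;> simp

lemma alt_eq_fst (s d : Int × Int) (g : List (List String)) :
    move_object_alt s d g = (movB (pvFuel g) [(s.1, s.2, pvCell g s.1 s.2)] d g).1 := by
  unfold move_object_alt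
  rcases hr : movB (pvFuel g) [(s.1, s.2, pvCell g s.1 s.2)] d g with ⟨b, g1⟩
  cases b <;> simp

-- ===== VERDICT (by name: the statement is the Claim_ definition above) =====
theorem move_object_spec : Claim_equal_move_object := by
  intro s d g _ _
  unfold Spec_move_object move_object
  rw [alt_eq_fst, movB_fst]
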